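-- pv_equiv track=rewrite | github.com/luxurahair/kenbot-runner | runner_cron_prod.py | _best_row_per_stock
-- ===== SOURCE A (Python) =====
-- from typing import Any, Dict, List, Optional, Tuple
--
-- def _best_row_per_stock(rows: List[Dict[str, Any]]) -> Dict[str, Dict[str, Any]]:
--     rank = {"ACTIVE": 3, "MISSING": 2, "SOLD": 1}
--     tmp: Dict[str, List[Dict[str, Any]]] = {}
--     for r in rows or []:
--         st = (r.get("stock") or "").strip().upper()
--         if not st:
--             continue
--         tmp.setdefault(st, []).append(r)
--
--     out: Dict[str, Dict[str, Any]] = {}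
--     def key(r):
--         st = (r.get("status") or "").upper()
--         return (rank.get(st, 0), (r.get("updated_at") or ""), (r.get("last_seen") or ""))
--     for st, lst in tmp.items():
--         out[st] = sorted(lst, key=key, reverse=True)[0]
--     return out
-- ===== SOURCE B (Python) =====
-- from typing import Any, Dict, List, Optional, Tuple
--
-- def _best_row_per_stock(rows: List[Dict[str, Any]]) -> Dict[str, Dict[str, Any]]:
--     order = ["SOLD", "MISSING", "ACTIVE"]
--
--     def sval(r, k):
--         v = r.get(k)
--         return v if v else ""
--
--     def norm(r):
--         return sval(r, "stock").strip().upper()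
--
--     def key(r):
--         st = sval(r, "status").upper()
--         rk = order.index(st) + 1 if st in order else 0
--         return (rk, sval(r, "updated_at"), sval(r, "last_seen"))
--
--     stocks: List[str] = []
--     for r in rows or []:
--         st = norm(r)
--         if st and st not in stocks:
--             stocks.append(st)
--
--     out: Dict[str, Dict[str, Any]] = {}
--     for st in stocks:
--         best = None
--         for r in rows or []:
--             if norm(r) == st and (best is None or key(r) > key(best)):
--                 best = r
--         out[st] = best
--     return out
-- ===== Notes on version B (the rewrite author's own statement) =====
-- stated objective: alternative
-- what changed: Replaces A's grouping dict-of-lists plus per-group descending sort with two dict-free passes: first collect the distinct normalized stocks in first-occurrence order, then for each stock a linear running-maximum scan over the rows (strict '>' keeps the first maximal row, as A's stable reverse sort does).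
import Mathlib
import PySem

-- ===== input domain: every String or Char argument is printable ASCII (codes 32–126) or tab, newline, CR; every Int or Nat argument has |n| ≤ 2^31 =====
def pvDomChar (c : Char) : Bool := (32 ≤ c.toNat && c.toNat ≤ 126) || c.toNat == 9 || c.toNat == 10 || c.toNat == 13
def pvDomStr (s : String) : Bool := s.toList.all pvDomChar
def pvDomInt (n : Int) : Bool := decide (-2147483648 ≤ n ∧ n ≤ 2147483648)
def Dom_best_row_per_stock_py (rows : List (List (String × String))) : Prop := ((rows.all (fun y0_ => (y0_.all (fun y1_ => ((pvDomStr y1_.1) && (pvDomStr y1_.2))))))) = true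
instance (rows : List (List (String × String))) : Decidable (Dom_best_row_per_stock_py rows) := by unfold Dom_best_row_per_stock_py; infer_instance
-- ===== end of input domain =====

-- B replaces A's grouping dict-of-lists + per-group descending sort by two dict-free
-- passes: distinct stocks in first-occurrence order, then one linear running-maximum
-- scan over the rows per stock (strict '>' keeps the first maximal row, like A's
-- stable reverse sort). Same return value; a different decomposition, not faster.

-- ===== PORT A =====
-- r.get(k) or "" : first-match lookup; None -> "" and the falsy "" -> "" coincide on string values
def pvAget (r : List (String × String)) (k : String) : String :=
  ((PySem.Dict.mk r).get? k).getD ""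

-- rank.get(st, 0) on the literal dict {"ACTIVE": 3, "MISSING": 2, "SOLD": 1}
def pvArank (st : String) : ℕ :=
  if st = "ACTIVE" then 3 else if st = "MISSING" then 2 else if st = "SOLD" then 1 else 0

-- key(r): Python's lexicographic tuple order = Lex (ℕ × Lex (String × String))
def pvAkey (r : List (String × String)) : Lex (ℕ × Lex (String × String)) :=
  toLex (pvArank (PySem.Str.upper (pvAget r "status")),
         toLex (pvAget r "updated_at", pvAget r "last_seen"))

def best_row_per_stock_py (rows : List (List (String × String))) : List (String × List (String × String)) :=
  let tmp : PySem.Dict String (List (List (String × String))) :=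
    rows.foldl (fun tmp r =>
      let st := PySem.Str.upper (PySem.Str.strip (pvAget r "stock"))
      if st = "" then tmp else tmp.modify st [] (fun l => l ++ [r])) PySem.Dict.empty
  -- sorted(lst, key=key, reverse=True)[0] ; the index 0 is always in range (groups are nonempty)
  (tmp.items.foldl (fun (out : PySem.Dict String (List (String × String))) p =>
      out.insert p.1 (PySem.List.pyGetD (PySem.List.sorted p.2 pvAkey true) 0 [])) PySem.Dict.empty).items

-- ===== PORT B =====
-- sval(r, k): r.get(k), falsy (None/"") -> ""; dict lookup = first match in the list
def pvBval (r : List (String × String)) (k : String) : String :=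
  ((r.find? (fun p => p.1 == k)).map Prod.snd).getD ""

def pvBnorm (r : List (String × String)) : String :=
  PySem.Str.upper (PySem.Str.strip (pvBval r "stock"))

-- order.index(st) + 1 if st in order else 0
def pvBrank (st : String) : ℕ :=
  if ["SOLD", "MISSING", "ACTIVE"].contains st
  then (PySem.List.index? ["SOLD", "MISSING", "ACTIVE"] st).getD 0 + 1 else 0

def pvBkey (r : List (String × String)) : Lex (ℕ × Lex (String × String)) :=
  toLex (pvBrank (PySem.Str.upper (pvBval r "status")),
         toLex (pvBval r "updated_at", pvBval r "last_seen"))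

-- best is None or key(r) > key(best)
def pvBetter (best : Option (List (String × String))) (r : List (String × String)) : Bool :=
  match best with
  | none => true
  | some b => decide (pvBkey b < pvBkey r)

-- the inner scan: first row of stock st with the (strictly) maximal key
def pvBestScan (rows : List (List (String × String))) (st : String) :
    Option (List (String × String)) :=
  rows.foldl (fun best r => if pvBnorm r == st && pvBetter best r then some r else best) none

def best_row_per_stock_py_alt (rows : List (List (String × String))) : List (String × List (String × String)) :=
  let stocks : List String :=
    rows.foldl (fun acc r =>
      let st := pvBnorm r
      if st ≠ "" ∧ st ∉ acc then acc ++ [st] else acc) []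
  -- out[st] = best : the keys st are distinct and fresh, so the dict is this assoc list;
  -- best is never None here (st came from some row), .getD [] is unreachable
  stocks.foldl (fun out st => out ++ [(st, (pvBestScan rows st).getD [])]) []

-- ===== PRECONDITION & SPEC =====
def Spec_best_row_per_stock_py (rows : List (List (String × String))) (out : List (String × List (String × String))) : Prop := out = best_row_per_stock_py_alt rows
instance (rows : List (List (String × String))) (out : List (String × List (String × String))) : Decidable (Spec_best_row_per_stock_py rows out) := by unfold Spec_best_row_per_stock_py; infer_instance

-- ===== CLAIM (what is proved, stated in full; the proofs are below) =====
def Claim_equal_best_row_per_stock_py : Prop := ∀ (rows : List (List (String × String))), Dom_best_row_per_stock_py rows → Spec_best_row_per_stock_py rows (best_row_per_stock_py rows)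

-- ===== LEMMAS AND PROOFS =====

-- the two ports' primitives coincide
lemma pvBval_eq_pvAget : pvBval = pvAget := by
  funext r k
  unfold pvBval pvAget
  induction r with
  | nil => rfl
  | cons p rest ih =>
    rw [PySem.Dict.get?_mk_cons]
    by_cases h : p.1 = k
    · simp [h]
    · have hb : (p.1 == k) = false := by simpa using h
      simp only [List.find?_cons, hb]
      exact ih

lemma pvBrank_eq_pvArank : pvBrank = pvArank := by
  funext st
  unfold pvBrank pvArank
  by_cases h1 : st = "ACTIVE"
  · subst h1; decide
  · by_cases h2 : st = "MISSING"
    · subst h2; decide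
    · by_cases h3 : st = "SOLD"
      · subst h3; decide
      · have hc : (["SOLD", "MISSING", "ACTIVE"].contains st) = false := by
          simp only [List.contains_cons, List.contains_nil, Bool.or_eq_false_iff, beq_eq_false_iff_ne]
          tauto
        simp [hc, h1, h2, h3]

lemma pvBkey_eq_pvAkey : pvBkey = pvAkey := by
  funext r; unfold pvBkey pvAkey; rw [pvBval_eq_pvAget, pvBrank_eq_pvArank]

def pvAnorm (r : List (String × String)) : String :=
  PySem.Str.upper (PySem.Str.strip (pvAget r "stock"))

lemma pvBnorm_eq_pvAnorm : pvBnorm = pvAnorm := by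
  funext r; unfold pvBnorm pvAnorm; rw [pvBval_eq_pvAget]

-- the first row with the maximal key, as A computes it
def pvBest (l : List (List (String × String))) : List (String × String) :=
  PySem.List.pyGetD (PySem.List.sorted l pvAkey true) 0 []

lemma pvBest_single (r : List (String × String)) : pvBest [r] = r := by
  unfold pvBest
  rw [PySem.List.sorted_rev_eq_foldl_insertBy]
  simp [PySem.List.insertBy, PySem.List.pyGetD_zero]

lemma pvBest_append (l : List (List (String × String))) (r : List (String × String)) (h : l ≠ []) :
    pvBest (l ++ [r]) = if pvAkey (pvBest l) < pvAkey r then r else pvBest l := by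
  have hs : PySem.List.sorted (l ++ [r]) pvAkey true
      = PySem.List.insertBy (fun a b => decide (pvAkey b < pvAkey a)) r (PySem.List.sorted l pvAkey true) := by
    rw [PySem.List.sorted_rev_eq_foldl_insertBy, PySem.List.sorted_rev_eq_foldl_insertBy,
        List.foldl_append]
    rfl
  cases hcs : PySem.List.sorted l pvAkey true with
  | nil => exact absurd ((PySem.List.sorted_eq_nil_iff l pvAkey true).mp hcs) h
  | cons m t =>
    unfold pvBest
    rw [hs, hcs, PySem.List.pyGetD_zero, PySem.List.pyGetD_zero]
    by_cases hlt : pvAkey m < pvAkey r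
    · simp [PySem.List.insertBy, hlt]
    · simp [PySem.List.insertBy, hlt]

-- the running-maximum scan over a nonempty list computes pvBest
lemma pv_scan_best (l : List (List (String × String))) (h : l ≠ []) :
    l.foldl (fun best r => if pvBetter best r then some r else best) none
      = some (pvBest l) := by
  induction l using List.reverseRecOn with
  | nil => exact absurd rfl h
  | append_singleton l r ih =>
    rw [List.foldl_append]
    by_cases hl : l = []
    · subst hl
      simp [pvBetter, pvBest_single]
    · rw [ih hl, pvBest_append l r hl]
      simp only [List.foldl_cons, List.foldl_nil, pvBetter, pvBkey_eq_pvAkey]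
      by_cases hlt : pvAkey (pvBest l) < pvAkey r
      · simp [hlt]
      · simp [hlt]

-- the guarded scan over rows = the plain scan over the rows of that stock
lemma pv_scan_filter (rows : List (List (String × String))) (st : String)
    (b0 : Option (List (String × String))) :
    rows.foldl (fun best r => if pvBnorm r == st && pvBetter best r then some r else best) b0
      = (rows.filter (fun r => pvAnorm r == st)).foldl
          (fun best r => if pvBetter best r then some r else best) b0 := by
  induction rows generalizing b0 with
  | nil => simp
  | cons r rs ih =>
    simp only [List.foldl_cons, List.filter_cons, pvBnorm_eq_pvAnorm]
    by_cases h : pvAnorm r = st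
    · have hb : (pvAnorm r == st) = true := by simpa using h
      rw [hb]
      simp only [Bool.true_and, if_true, List.foldl_cons]
      exact ih _
    · have hb : (pvAnorm r == st) = false := by simpa using h
      rw [hb]
      simp only [Bool.false_and]
      exact ih b0

-- A's grouping loop, rewritten over (stock, row) pairs of the kept rows
def pvKept (rows : List (List (String × String))) : List (List (String × String)) :=
  rows.filter (fun r => !(pvAnorm r == ""))

lemma pv_groupA (rows : List (List (String × String)))
    (d : PySem.Dict String (List (List (String × String)))) :
    rows.foldl (fun tmp r =>
      let st := PySem.Str.upper (PySem.Str.strip (pvAget r "stock"))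
      if st = "" then tmp else tmp.modify st [] (fun l => l ++ [r])) d
    = ((pvKept rows).map (fun r => (pvAnorm r, r))).foldl
        (fun d p => d.modify p.1 [] (fun l => l ++ [p.2])) d := by
  induction rows generalizing d with
  | nil => rfl
  | cons r rs ih =>
    simp only [List.foldl_cons, pvKept, List.filter_cons]
    by_cases h : pvAnorm r = ""
    · have hb : (pvAnorm r == "") = true := by simpa using h
      simp only [hb, Bool.not_true]
      rw [show (if PySem.Str.upper (PySem.Str.strip (pvAget r "stock")) = "" then d
            else d.modify (PySem.Str.upper (PySem.Str.strip (pvAget r "stock"))) [] (fun l => l ++ [r]))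
          = d from by simp [show PySem.Str.upper (PySem.Str.strip (pvAget r "stock")) = "" from h]]
      exact ih d
    · have hb : (pvAnorm r == "") = false := by simpa using h
      simp only [hb, Bool.not_false, if_true, List.map_cons, List.foldl_cons]
      rw [show (if PySem.Str.upper (PySem.Str.strip (pvAget r "stock")) = "" then d
            else d.modify (PySem.Str.upper (PySem.Str.strip (pvAget r "stock"))) [] (fun l => l ++ [r]))
          = d.modify (pvAnorm r) [] (fun l => l ++ [r]) from by
        simp [pvAnorm, show ¬ PySem.Str.upper (PySem.Str.strip (pvAget r "stock")) = "" from h]]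
      exact ih _

-- B's first loop computes set(ofList) of the kept stocks, in first-occurrence order
lemma pv_stocksB (rows : List (List (String × String))) (acc : List String)
    (hacc : "" ∉ acc) :
    rows.foldl (fun acc r =>
      let st := pvBnorm r
      if st ≠ "" ∧ st ∉ acc then acc ++ [st] else acc) acc
    = PySem.Set.update acc ((pvKept rows).map pvAnorm) := by
  induction rows generalizing acc with
  | nil => simp [pvKept, PySem.Set.update]
  | cons r rs ih =>
    simp only [List.foldl_cons, pvKept, List.filter_cons, pvBnorm_eq_pvAnorm]
    by_cases h : pvAnorm r = ""
    · have hb : (pvAnorm r == "") = true := by simpa using h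
      simp only [hb, Bool.not_true]
      rw [show (if pvAnorm r ≠ "" ∧ pvAnorm r ∉ acc then acc ++ [pvAnorm r] else acc) = acc from by
        simp [h]]
      exact ih acc hacc
    · have hb : (pvAnorm r == "") = false := by simpa using h
      simp only [hb, Bool.not_false, if_true, List.map_cons]
      rw [show PySem.Set.update acc (pvAnorm r :: (List.filter (fun r => !(pvAnorm r == "")) rs).map pvAnorm)
          = PySem.Set.update (PySem.Set.add acc (pvAnorm r)) ((List.filter (fun r => !(pvAnorm r == "")) rs).map pvAnorm) from rfl]
      by_cases hm : pvAnorm r ∈ acc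
      · have : (if pvAnorm r ≠ "" ∧ pvAnorm r ∉ acc then acc ++ [pvAnorm r] else acc) = acc :=
          if_neg (fun hc => hc.2 hm)
        rw [this, show PySem.Set.add acc (pvAnorm r) = acc from by
          simp [PySem.Set.add, hm]]
        exact ih acc hacc
      · have : (if pvAnorm r ≠ "" ∧ pvAnorm r ∉ acc then acc ++ [pvAnorm r] else acc)
            = acc ++ [pvAnorm r] := if_pos ⟨h, hm⟩
        rw [this, show PySem.Set.add acc (pvAnorm r) = acc ++ [pvAnorm r] from by
          simp [PySem.Set.add, hm]]
        exact ih _ (by simp [hacc, Ne.symm h])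

-- the second loop of A over a dict with fresh nodup keys just maps pvBest over the items
lemma pv_final (ps : List (String × List (List (String × String))))
    (d0 : PySem.Dict String (List (String × String)))
    (hfresh : ∀ p ∈ ps, d0.contains p.1 = false)
    (hnd : (ps.map Prod.fst).Nodup) :
    (ps.foldl (fun out p =>
        out.insert p.1 (PySem.List.pyGetD (PySem.List.sorted p.2 pvAkey true) 0 [])) d0).items
      = d0.items ++ ps.map (fun p => (p.1, pvBest p.2)) := by
  induction ps generalizing d0 with
  | nil => simp
  | cons p ps ih =>
    simp only [List.foldl_cons, List.map_cons]
    rw [ih (d0.insert p.1 (PySem.List.pyGetD (PySem.List.sorted p.2 pvAkey true) 0 []))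
        ?_ (by simpa using hnd.of_cons)]
    · rw [PySem.Dict.items_insert_of_not_contains _ _ (hfresh p (by simp))]
      simp [pvBest]
    · intro q hq
      rw [PySem.Dict.contains_insert]
      have hq1 : q.1 ≠ p.1 := by
        simp only [List.map_cons, List.nodup_cons] at hnd
        intro he
        exact hnd.1 (he ▸ List.mem_map_of_mem hq)
      simp [hq1, hfresh q (by simp [hq])]

-- B's outer loop is a map (distinct fresh keys appended one by one)
lemma pv_foldl_append {α β : Type} (l : List α) (f : α → β) (acc : List β) :
    l.foldl (fun out x => out ++ [f x]) acc = acc ++ l.map f := by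
  induction l generalizing acc with
  | nil => simp
  | cons x xs ih => simp [ih]

-- per-stock group of A, as a plain filter
def pvGrp (rows : List (List (String × String))) (st : String) : List (List (String × String)) :=
  (pvKept rows).filter (fun r => pvAnorm r == st)

lemma pv_tmp_keys (rows : List (List (String × String))) :
    ((((pvKept rows).map (fun r => (pvAnorm r, r))).foldl
        (fun d p => d.modify p.1 [] (fun l => l ++ [p.2])) PySem.Dict.empty).keys
      = PySem.Set.ofList ((pvKept rows).map pvAnorm)) := by
  have h : ((((pvKept rows).map (fun r => (pvAnorm r, r))).foldl
      (fun d p => d.modify p.1 [] (fun l => l ++ [p.2])) PySem.Dict.empty).keys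
      = PySem.Set.update (PySem.Dict.empty (ν := List (List (String × String)))).keys
          (((pvKept rows).map (fun r => (pvAnorm r, r))).map Prod.fst)) :=
    PySem.Dict.keys_foldl_modify_key _ Prod.fst [] (fun _ p l => l ++ [p.2]) PySem.Dict.empty
  rw [h, PySem.Set.ofList_eq_foldl]
  simp only [List.map_map, PySem.Dict.keys_empty, PySem.Set.update]
  rfl

lemma pv_tmp_nodup (rows : List (List (String × String))) :
    ((((pvKept rows).map (fun r => (pvAnorm r, r))).foldl
        (fun d p => d.modify p.1 [] (fun l => l ++ [p.2])) PySem.Dict.empty).keys).Nodup :=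
  PySem.Dict.nodup_keys_foldl_modify_key _ Prod.fst [] (fun _ p l => l ++ [p.2])
    PySem.Dict.empty (by simp [PySem.Dict.keys_empty])

lemma pv_tmp_getD (rows : List (List (String × String))) (st : String) :
    ((((pvKept rows).map (fun r => (pvAnorm r, r))).foldl
        (fun d p => d.modify p.1 [] (fun l => l ++ [p.2])) PySem.Dict.empty).getD st [])
      = pvGrp rows st := by
  have h := PySem.Dict.getD_foldl_modify_append
    ((pvKept rows).map (fun r => (pvAnorm r, r))) (PySem.Dict.empty) st
  rw [h, PySem.Dict.getD_empty]
  simp [pvGrp, List.filter_map, List.map_map, Function.comp_def]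

-- a stock present in the kept rows has a nonempty group and is not ""
lemma pv_mem_kept (rows : List (List (String × String))) (st : String)
    (h : st ∈ (pvKept rows).map pvAnorm) : st ≠ "" ∧ pvGrp rows st ≠ [] := by
  obtain ⟨r, hr, hrn⟩ := List.mem_map.mp h
  have hrk := (List.mem_filter.mp hr).2
  have hne : st ≠ "" := by
    intro he; rw [← hrn] at he; simp [he] at hrk
  refine ⟨hne, List.ne_nil_of_mem (a := r) ?_⟩
  exact List.mem_filter.mpr ⟨hr, by simpa using hrn⟩

-- the scan over all rows computes pvBest of the group
lemma pv_scan_grp (rows : List (List (String × String))) (st : String) (hne : st ≠ "") :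
    pvBestScan rows st = (pvGrp rows st).foldl
      (fun best r => if pvBetter best r then some r else best) none := by
  unfold pvBestScan
  rw [pv_scan_filter rows st none]
  have : pvGrp rows st = rows.filter (fun r => pvAnorm r == st) := by
    unfold pvGrp pvKept
    rw [List.filter_filter]
    refine List.filter_congr fun r _ => ?_
    by_cases h : pvAnorm r = st
    · have : (pvAnorm r == "") = false := by simp [h, hne]
      simp [h, hne]
    · simp [show (pvAnorm r == st) = false from by simpa using h]
  rw [this]

-- ===== VERDICT (by name: the statement is the Claim_ definition above) =====
theorem best_row_per_stock_py_spec : Claim_equal_best_row_per_stock_py := by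
  intro rows _
  unfold Spec_best_row_per_stock_py best_row_per_stock_py best_row_per_stock_py_alt
  rw [pv_groupA rows PySem.Dict.empty]
  set tmp := (((pvKept rows).map (fun r => (pvAnorm r, r))).foldl
      (fun d p => d.modify p.1 [] (fun l => l ++ [p.2])) PySem.Dict.empty) with htmp
  have hkeys := pv_tmp_keys rows
  have hnodup := pv_tmp_nodup rows
  -- A's second loop = map pvBest over the items
  have hnd2 : (tmp.items.map Prod.fst).Nodup := hnodup
  rw [pv_final tmp.items PySem.Dict.empty
      (fun p _ => PySem.Dict.contains_empty p.1) hnd2]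
  have hitems : tmp.items = tmp.keys.map (fun k => (k, pvGrp rows k)) := by
    rw [PySem.Dict.items_eq_map_keys tmp hnodup []]
    exact List.map_congr_left fun k _ => by rw [pv_tmp_getD rows k]
  -- B's first loop builds the same key list
  rw [show (rows.foldl (fun acc r =>
        let st := pvBnorm r
        if st ≠ "" ∧ st ∉ acc then acc ++ [st] else acc) ([] : List String))
      = tmp.keys from by
    rw [pv_stocksB rows [] (by simp), hkeys, PySem.Set.ofList_eq_foldl]; rfl]
  rw [pv_foldl_append tmp.keys (fun st => (st, (pvBestScan rows st).getD [])) []]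
  simp only [hitems, List.map_map,
    show (PySem.Dict.empty : PySem.Dict String (List (String × String))).items = [] from rfl,
    List.nil_append]
  refine List.map_congr_left fun st hst => ?_
  have hmem : st ∈ (pvKept rows).map pvAnorm := by
    rw [hkeys] at hst
    exact (PySem.Set.mem_ofList _ _).mp hst
  obtain ⟨hne, hgrp⟩ := pv_mem_kept rows st hmem
  have := pv_scan_grp rows st hne
  rw [this, pv_scan_best (pvGrp rows st) hgrp]
  simp [Function.comp]
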